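-- pv_equiv track=rewrite | github.com/puo22/Gramaticas | Gram5_py/G5.py | pertenece_g5
-- ===== SOURCE A (Python) =====
-- def pertenece_g5(cadena):
--     cadena = cadena.strip()
--     if cadena == "":
--         return False
--
--     if cadena == "ab":
--         return True
--
--     if cadena[0] == 'a' and cadena[-1] == 'b':
--         interior = cadena[1:-1]
--         if interior == "":
--             return True  # Caso n=0
--         if interior.count("ab") * 2 == len(interior):
--             i = 0
--             while i < len(interior):
--                 if interior[i:i+2] != "ab":
--                     return False
--                 i += 2
--             return True
--     return False
-- ===== SOURCE B (Python) =====
-- def pertenece_g5(cadena):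
--     # The language is a(ab)*b: build the unique candidate of the stripped
--     # string's length and compare in one shot.
--     s = cadena.strip()
--     n = len(s)
--     return n >= 2 and n % 2 == 0 and s == "a" + "ab" * ((n - 2) // 2) + "b"
-- ===== Notes on version B (the rewrite author's own statement) =====
-- stated objective: simpler
-- what changed: B recognises the language a(ab)*b by constructing the unique candidate string of the stripped input's length ("a" + "ab"*k + "b") and comparing it once for equality, replacing A's substring count check plus index-stepping while loop over two-character chunks.
import Mathlib
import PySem

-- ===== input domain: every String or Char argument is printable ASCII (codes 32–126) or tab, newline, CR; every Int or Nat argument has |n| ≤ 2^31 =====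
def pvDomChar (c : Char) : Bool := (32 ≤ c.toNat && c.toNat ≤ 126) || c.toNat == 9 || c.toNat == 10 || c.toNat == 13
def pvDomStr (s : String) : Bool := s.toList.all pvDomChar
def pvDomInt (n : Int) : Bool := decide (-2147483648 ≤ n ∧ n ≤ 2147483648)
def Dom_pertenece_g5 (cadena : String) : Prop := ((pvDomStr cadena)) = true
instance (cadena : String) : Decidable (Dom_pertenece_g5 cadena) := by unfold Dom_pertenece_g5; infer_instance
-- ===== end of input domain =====

-- B recognises the language a(ab)*b by building the unique candidate string of the
-- stripped input's length and comparing once, instead of A's count+while chunk scan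
-- (objective: simpler; no speed claim).

-- ===== PORT A =====
-- the `while i < len(interior): if interior[i:i+2] != "ab": return False; i += 2` loop
def pvLoopA (interior : List Char) (i : Nat) : Bool :=
  if _h : i < interior.length then
    if PySem.List.slice interior (some (i : Int)) (some ((i : Int) + 2)) ≠ ['a','b'] then false
    else pvLoopA interior (i + 2)
  else true
termination_by interior.length - i
decreasing_by omega

def pertenece_g5 (cadena : String) : Bool :=
  let c := (PySem.Str.strip cadena).toList
  if c = [] then false
  else if c = ['a','b'] then true
  else if PySem.List.pyGet? c 0 = some 'a' ∧ PySem.List.pyGet? c (-1) = some 'b' then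
    let interior := PySem.List.slice c (some 1) (some (-1))
    if interior = [] then true
    else if PySem.Chars.count interior ['a','b'] * 2 = interior.length then pvLoopA interior 0
    else false
  else false

-- ===== PORT B =====
-- "ab" * k ported by hand as replicate/flatten; toNat clamps k ≤ 0 to the
-- empty string exactly as Python's string repetition does
def pvRepAB (k : Nat) : List Char := (List.replicate k ['a','b']).flatten

def pertenece_g5_alt (cadena : String) : Bool :=
  let s := (PySem.Str.strip cadena).toList
  let n : Int := (s.length : Int)
  decide (2 ≤ n) && decide (PySem.Int.mod n 2 = 0) &&
    (s == 'a' :: pvRepAB (PySem.Int.floordiv (n - 2) 2).toNat ++ ['b'])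

-- ===== PRECONDITION & SPEC =====
def Spec_pertenece_g5 (cadena : String) (out : Bool) : Prop := out = pertenece_g5_alt cadena
instance (cadena : String) (out : Bool) : Decidable (Spec_pertenece_g5 cadena out) := by unfold Spec_pertenece_g5; infer_instance

-- ===== CLAIM (what is proved, stated in full; the proofs are below) =====
def Claim_equal_pertenece_g5 : Prop := ∀ (cadena : String), Dom_pertenece_g5 cadena → Spec_pertenece_g5 cadena (pertenece_g5 cadena)

-- ===== LEMMAS AND PROOFS =====
-- structural form of A's chunk loop
def pvIsPairs : List Char → Bool
  | [] => true
  | [_] => false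
  | x :: y :: r => x == 'a' && y == 'b' && pvIsPairs r

theorem pv_go_rep (k : Nat) : ∀ (fuel acc : Nat), 2 * k ≤ fuel →
    PySem.Chars.count.go ['a','b'] fuel (pvRepAB k) acc = acc + k := by
  induction k with
  | zero =>
    intro fuel acc _
    cases fuel <;> simp [pvRepAB, PySem.Chars.count.go]
  | succ k ih =>
    intro fuel acc h
    obtain ⟨f, rfl⟩ : ∃ f, fuel = f + 1 := ⟨fuel - 1, by omega⟩
    have hrep : pvRepAB (k+1) = 'a' :: 'b' :: pvRepAB k := by
      simp [pvRepAB, List.replicate_succ]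
    rw [hrep, PySem.Chars.count.go]
    have hpre : (['a','b'] : List Char).isPrefixOf ('a' :: 'b' :: pvRepAB k) = true := by
      simp [List.isPrefixOf]
    rw [if_pos hpre]
    rw [show ('a' :: 'b' :: pvRepAB k).drop (['a','b'] : List Char).length = pvRepAB k from rfl]
    rw [ih f (acc+1) (by omega)]
    omega

theorem pv_length_rep (k : Nat) : (pvRepAB k).length = 2 * k := by
  simp [pvRepAB, Nat.mul_comm]

theorem pv_count_rep (k : Nat) : PySem.Chars.count (pvRepAB k) ['a','b'] = k := by
  rw [PySem.Chars.count]
  simp only [List.isEmpty_cons, if_false, Bool.false_eq_true]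
  rw [pv_go_rep k _ 0 (by rw [pv_length_rep])]
  omega

theorem pv_loop_eq (mid : List Char) : ∀ (d i : Nat), mid.length - i ≤ d →
    pvLoopA mid i = pvIsPairs (mid.drop i) := by
  intro d
  induction d with
  | zero =>
    intro i h
    rw [pvLoopA, dif_neg (by omega)]
    rw [List.drop_of_length_le (by omega)]
    rfl
  | succ d ih =>
    intro i h
    by_cases hi : i < mid.length
    · rw [pvLoopA, dif_pos hi]
      have hsl : PySem.List.slice mid (some (i : Int)) (some ((i : Int) + 2)) = (mid.drop i).take 2 := by
        have := PySem.List.slice_natCast_add mid i 2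
        simpa using this
      have hl : (mid.drop i).length = mid.length - i := List.length_drop
      rcases hd : mid.drop i with _ | ⟨x, rest⟩
      · exfalso; rw [hd] at hl; simp at hl; omega
      rcases rest with _ | ⟨y, r⟩
      · rw [hsl, hd]
        simp [pvIsPairs]
      · rw [hsl, hd]
        have hd2 : mid.drop (i + 2) = r := by
          have h22 : mid.drop (i + 2) = (mid.drop i).drop 2 := by
            rw [List.drop_drop]
          rw [h22, hd]; rfl
        have hlen : mid.length - (i + 2) ≤ d := by
          rw [hd] at hl; simp at hl; omega
        rw [ih (i + 2) hlen, hd2]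
        by_cases hx : x = 'a' ∧ y = 'b'
        · obtain ⟨rfl, rfl⟩ := hx
          simp [pvIsPairs]
        · rw [if_pos]
          · simp only [pvIsPairs, Bool.false_eq]
            rcases (not_and_or.mp hx) with hne | hne <;> simp [hne]
          · simp only [List.take_succ_cons, List.take_zero]
            intro hcontra
            apply hx
            injection hcontra with h1 h2
            injection h2 with h2 _
            exact ⟨h1, h2⟩
    · rw [pvLoopA, dif_neg hi]
      rw [List.drop_of_length_le (by omega)]
      rfl

theorem pv_pairs_eq (r : List Char) :
    pvIsPairs r = (decide (r.length % 2 = 0) && decide (r = pvRepAB (r.length / 2))) := by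
  induction r using pvIsPairs.induct with
  | case1 => simp [pvIsPairs, pvRepAB]
  | case2 x =>
    simp [pvIsPairs]
  | case3 x y t ih =>
    simp only [pvIsPairs, ih]
    have hlen : (x :: y :: t).length = t.length + 2 := by simp
    rw [hlen]
    have h2 : (t.length + 2) % 2 = t.length % 2 := by omega
    have h3 : (t.length + 2) / 2 = t.length / 2 + 1 := by omega
    rw [h2, h3]
    have hrep : pvRepAB (t.length / 2 + 1) = 'a' :: 'b' :: pvRepAB (t.length / 2) := by
      simp [pvRepAB, List.replicate_succ]
    rw [hrep]
    by_cases hx : x = 'a' ∧ y = 'b'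
    · obtain ⟨rfl, rfl⟩ := hx; simp
    · simp only [List.cons.injEq]
      rcases (not_and_or.mp hx) with h | h <;> simp [h]

theorem pv_slice_inner (x z : Char) (mid : List Char) :
    PySem.List.slice (x :: (mid ++ [z])) (some 1) (some (-1)) = mid := by
  simp [PySem.List.slice, PySem.List.clampIdx]
  rw [if_neg (by omega)]
  simp

-- x :: mid ++ [z] equals the candidate 'a' :: (ab)^k ++ ['b'] iff componentwise
theorem pv_cand_iff (x z : Char) (mid : List Char) (k : Nat) :
    x :: (mid ++ [z]) = 'a' :: (pvRepAB k ++ ['b']) ↔ (x = 'a' ∧ z = 'b' ∧ mid = pvRepAB k) := by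
  constructor
  · intro h
    injection h with h1 h2
    have := List.append_inj' h2 rfl
    obtain ⟨hm, hz⟩ := this
    exact ⟨h1, by injection hz, hm⟩
  · rintro ⟨rfl, rfl, rfl⟩; rfl

theorem pv_core (t : List Char) :
    (if t = [] then false
     else if t = ['a','b'] then true
     else if PySem.List.pyGet? t 0 = some 'a' ∧ PySem.List.pyGet? t (-1) = some 'b' then
       let interior := PySem.List.slice t (some 1) (some (-1))
       if interior = [] then true
       else if PySem.Chars.count interior ['a','b'] * 2 = interior.length then pvLoopA interior 0
       else false
     else false)
    = (decide (2 ≤ (t.length : Int)) && decide (PySem.Int.mod (t.length : Int) 2 = 0) &&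
       (t == 'a' :: pvRepAB (PySem.Int.floordiv ((t.length : Int) - 2) 2).toNat ++ ['b'])) := by
  rcases t with _ | ⟨x, m⟩
  · simp
  rcases m.eq_nil_or_concat with rfl | ⟨mid, z, rfl⟩
  · -- singleton [x]: A's head/last test needs x = 'a' and x = 'b' at once; B fails 2 ≤ 1
    have hA : ¬ (PySem.List.pyGet? [x] 0 = some 'a' ∧ PySem.List.pyGet? [x] (-1) = some 'b') := by
      simp [pysem]
      intro h; rw [h]; decide
    rw [if_neg (by simp), if_neg (by simp), if_neg hA]
    simp
  · -- t = x :: mid ++ [z]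
    simp only [List.concat_eq_append]
    have hne : (x :: (mid ++ [z]) : List Char) ≠ [] := by simp
    have hhead : PySem.List.pyGet? (x :: (mid ++ [z])) 0 = some x := by simp [pysem]
    have hlast : PySem.List.pyGet? (x :: (mid ++ [z])) (-1) = some z := by
      rw [show (x :: (mid ++ [z])) = (x :: mid) ++ [z] by simp]
      exact PySem.List.pyGet?_neg_one_append_singleton (x :: mid) z
    have hlen : ((x :: (mid ++ [z])).length : Int) = ((mid.length : Int) + 2) := by
      simp; omega
    -- B's arithmetic in terms of mid.length
    have hmod : PySem.Int.mod ((mid.length : Int) + 2) 2 = ((((mid.length + 2) % 2 : Nat)) : Int) := by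
      have := PySem.Int.mod_natCast (mid.length + 2) 2
      rw [← this]; norm_num
    have hfd : (PySem.Int.floordiv (((mid.length : Int) + 2) - 2) 2).toNat = mid.length / 2 := by
      have h1 : (((mid.length : Int) + 2) - 2) = ((mid.length : Nat) : Int) := by ring
      rw [h1]
      have h2 : PySem.Int.floordiv ((mid.length : Nat) : Int) 2 = ((mid.length / 2 : Nat) : Int) := by
        exact_mod_cast PySem.Int.floordiv_natCast mid.length 2
      rw [h2]; exact Int.toNat_natCast _
    have h2le : decide (2 ≤ ((mid.length : Int) + 2)) = true := by
      simp
    rw [if_neg hne, hlen, h2le, hmod, hfd]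
    by_cases hab : (x :: (mid ++ [z]) : List Char) = ['a','b']
    · -- the short-circuited "ab" case: mid = [], x = 'a', z = 'b'
      have hmid : mid = [] := by
        have : (x :: (mid ++ [z])).length = 2 := by rw [hab]; rfl
        simp at this; simpa using this
      subst hmid
      simp only [List.nil_append] at hab ⊢
      injection hab with h1 h2
      injection h2 with h2 _
      subst h1; subst h2
      rw [if_pos rfl]
      decide
    · rw [if_neg hab]
      rw [hhead, hlast]
      have hsl := pv_slice_inner x z mid
      by_cases hx : x = 'a' ∧ z = 'b'
      · obtain ⟨rfl, rfl⟩ := hx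
        rw [if_pos (by simp)]
        simp only [hsl]
        by_cases hm : mid = []
        · exfalso; apply hab; rw [hm]; rfl
        · rw [if_neg hm]
          have hloop : pvLoopA mid 0 =
              (decide (mid.length % 2 = 0) && decide (mid = pvRepAB (mid.length / 2))) := by
            rw [pv_loop_eq mid mid.length 0 (by omega), List.drop_zero, pv_pairs_eq]
          by_cases hP : mid.length % 2 = 0 ∧ mid = pvRepAB (mid.length / 2)
          · obtain ⟨hp1, hp2⟩ := hP
            have hcnt : PySem.Chars.count mid ['a','b'] * 2 = mid.length := by
              rw [hp2, pv_count_rep, pv_length_rep] at *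
              omega
            rw [if_pos hcnt, hloop]
            have e1 : (decide ((((mid.length + 2) % 2 : Nat) : Int) = 0)) = true := by
              simp; omega
            have e2 : ('a' :: (mid ++ ['b']) == 'a' :: pvRepAB (mid.length / 2) ++ ['b']) = true := by
              rw [beq_iff_eq]
              exact (pv_cand_iff 'a' 'b' mid _).mpr ⟨rfl, rfl, hp2⟩
            have d1 : decide (mid.length % 2 = 0) = true := decide_eq_true hp1
            have d2 : decide (mid = pvRepAB (mid.length / 2)) = true := decide_eq_true hp2
            rw [d1, d2, e1, e2]
            rfl
          · have hAside : (if PySem.Chars.count mid ['a','b'] * 2 = mid.length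
                then pvLoopA mid 0 else false) = false := by
              by_cases hc : PySem.Chars.count mid ['a','b'] * 2 = mid.length
              · rw [if_pos hc, hloop]
                rcases not_and_or.mp hP with h | h <;> simp [h]
              · rw [if_neg hc]
            rw [hAside]
            symm
            rcases not_and_or.mp hP with h | h
            · have hz : (decide ((((mid.length + 2) % 2 : Nat) : Int) = 0)) = false := by
                simp; omega
              rw [hz]
              simp only [Bool.true_and, Bool.false_and]
            · have hc : ('a' :: (mid ++ ['b']) == 'a' :: pvRepAB (mid.length / 2) ++ ['b']) = false := by
                rw [beq_eq_false_iff_ne]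
                intro hcon
                exact h ((pv_cand_iff 'a' 'b' mid _).mp hcon).2.2
              rw [hc]
              simp only [Bool.and_false]
      · rw [if_neg (by simpa using hx)]
        have hc : (x :: (mid ++ [z]) == 'a' :: pvRepAB (mid.length / 2) ++ ['b']) = false := by
          rw [beq_eq_false_iff_ne]
          intro hcon
          have hcc := (pv_cand_iff x z mid _).mp hcon
          exact hx ⟨hcc.1, hcc.2.1⟩
        rw [hc]
        simp only [Bool.and_false]

-- ===== VERDICT (by name: the statement is the Claim_ definition above) =====
theorem pertenece_g5_spec : Claim_equal_pertenece_g5 := by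
  intro cadena _
  unfold Spec_pertenece_g5 pertenece_g5 pertenece_g5_alt
  have := pv_core (PySem.Str.strip cadena).toList
  simpa using this
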